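-- pv_equiv track=rewrite | github.com/jgilchrist/advent-of-code | 2020/08.py | substitute_jmp
-- ===== SOURCE A (Python) =====
-- def substitute_jmp(program, jmp_number):
--     jmps_seen = 0
--     program = list(program)
--
--     for index, instruction in enumerate(program):
--         opcode, value = instruction
--         if opcode == "jmp":
--             jmps_seen += 1
--
--             if jmps_seen == jmp_number:
--                 program[index] = ("nop", value)
--
--     return program
-- ===== SOURCE B (Python) =====
-- def substitute_jmp(program, jmp_number):
--     program = list(program)
--     jmp_indices = [i for i, (opcode, _) in enumerate(program) if opcode == "jmp"]
--     if 1 <= jmp_number <= len(jmp_indices):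
--         idx = jmp_indices[jmp_number - 1]
--         program[idx] = ("nop", program[idx][1])
--     return program
-- ===== Notes on version B (the rewrite author's own statement) =====
-- stated objective: simpler
-- what changed: B first collects the indices of all jmp instructions in one comprehension, then performs a single guarded positional edit at the (jmp_number-1)-th collected index, instead of A's interleaved counting-and-mutating sweep with a comparison in every iteration.
import Mathlib
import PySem

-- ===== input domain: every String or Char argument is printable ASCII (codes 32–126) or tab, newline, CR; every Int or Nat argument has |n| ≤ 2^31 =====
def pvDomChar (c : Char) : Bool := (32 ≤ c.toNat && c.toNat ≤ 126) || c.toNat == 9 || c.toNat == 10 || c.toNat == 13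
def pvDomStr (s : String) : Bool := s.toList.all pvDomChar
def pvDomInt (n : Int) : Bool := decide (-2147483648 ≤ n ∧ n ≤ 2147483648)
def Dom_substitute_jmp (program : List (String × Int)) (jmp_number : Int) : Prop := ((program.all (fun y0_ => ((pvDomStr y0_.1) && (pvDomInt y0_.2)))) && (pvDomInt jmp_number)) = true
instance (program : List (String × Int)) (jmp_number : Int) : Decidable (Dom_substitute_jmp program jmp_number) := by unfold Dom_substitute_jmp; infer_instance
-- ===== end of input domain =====

-- B replaces A's interleaved count-and-mutate sweep by collecting all jmp indices
-- first and doing one guarded positional edit (objective: simpler decomposition).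

-- ===== PORT A =====
-- the for-loop over enumerate(program) with the running counter jmps_seen;
-- program[index] = ("nop", value) rewrites the element the loop is currently at,
-- so the loop is the structural recursion below carrying jmps_seen.
def substituteJmpGo (prog : List (String × Int)) (jmps_seen : Int) (jmp_number : Int) :
    List (String × Int) :=
  match prog with
  | [] => []
  | (opcode, value) :: rest =>
    if opcode == "jmp" then
      (if jmps_seen + 1 == jmp_number then ("nop", value) else (opcode, value)) ::
        substituteJmpGo rest (jmps_seen + 1) jmp_number
    else
      (opcode, value) :: substituteJmpGo rest jmps_seen jmp_number

def substitute_jmp (program : List (String × Int)) (jmp_number : Int) : List (String × Int) :=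
  substituteJmpGo program 0 jmp_number

-- ===== PORT B =====
def substitute_jmp_alt (program : List (String × Int)) (jmp_number : Int) : List (String × Int) :=
  let jmp_indices : List Int :=
    (PySem.List.enumerate program 0).filterMap
      (fun p => if p.2.1 == "jmp" then some p.1 else none)
  if 1 ≤ jmp_number ∧ jmp_number ≤ (jmp_indices.length : Int) then
    match PySem.List.pyGet? jmp_indices (jmp_number - 1) with
    | some idx =>
      match PySem.List.pyGet? program idx with
      | some (_, v) => program.set idx.toNat ("nop", v)
      | none => program            -- unreachable under the guard
    | none => program              -- unreachable under the guard
  else program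

-- ===== PRECONDITION & SPEC =====
def Spec_substitute_jmp (program : List (String × Int)) (jmp_number : Int) (out : List (String × Int)) : Prop := out = substitute_jmp_alt program jmp_number
instance (program : List (String × Int)) (jmp_number : Int) (out : List (String × Int)) : Decidable (Spec_substitute_jmp program jmp_number out) := by unfold Spec_substitute_jmp; infer_instance

-- ===== CLAIM (what is proved, stated in full; the proofs are below) =====
def Claim_equal_substitute_jmp : Prop := ∀ (program : List (String × Int)) (jmp_number : Int), Dom_substitute_jmp program jmp_number → Spec_substitute_jmp program jmp_number (substitute_jmp program jmp_number)

-- ===== LEMMAS AND PROOFS =====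

-- reference function: replace the jmp_number-th jmp, counting down
def fRef : List (String × Int) → Int → List (String × Int)
  | [], _ => []
  | (op, v) :: rest, j =>
    if op == "jmp" then
      (if j == 1 then ("nop", v) else (op, v)) :: fRef rest (j - 1)
    else
      (op, v) :: fRef rest j

theorem substituteJmpGo_eq_fRef (prog : List (String × Int)) (seen j : Int) :
    substituteJmpGo prog seen j = fRef prog (j - seen) := by
  induction prog generalizing seen with
  | nil => rfl
  | cons x rest ih =>
    obtain ⟨op, v⟩ := x
    simp only [substituteJmpGo, fRef]
    by_cases hop : op = "jmp"
    · have hb : (seen + 1 == j) = (j - seen == 1) := by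
        by_cases h : seen + 1 = j
        · simp [h]; omega
        · have h2 : ¬ (j - seen = 1) := by omega
          simp [h, h2]
      simp only [hop, beq_self_eq_true, if_true, hb, ih]
      have he : j - (seen + 1) = j - seen - 1 := by ring
      rw [he]
    · simp [hop, ih]

theorem fRef_nonpos (prog : List (String × Int)) (j : Int) (h : j ≤ 0) : fRef prog j = prog := by
  induction prog generalizing j with
  | nil => rfl
  | cons x rest ih =>
    obtain ⟨op, v⟩ := x
    simp only [fRef]
    by_cases hop : op = "jmp"
    · have h1 : (j == 1) = false := by simp; omega
      simp [hop, h1, ih _ (by omega : j - 1 ≤ 0)]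
    · simp [hop, ih _ h]

def jmpIdx (prog : List (String × Int)) (s : Int) : List Int :=
  (PySem.List.enumerate prog s).filterMap
    (fun p => if p.2.1 == "jmp" then some p.1 else none)

theorem jmpIdx_cons (op : String) (v : Int) (rest : List (String × Int)) (s : Int) :
    jmpIdx ((op, v) :: rest) s =
      (if op = "jmp" then [s] else []) ++ jmpIdx rest (s + 1) := by
  by_cases hop : op = "jmp" <;>
    simp [jmpIdx, PySem.List.enumerate_cons, hop]

theorem jmpIdx_shift (prog : List (String × Int)) (s : Int) :
    jmpIdx prog s = (jmpIdx prog 0).map (· + s) := by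
  induction prog generalizing s with
  | nil => rfl
  | cons x rest ih =>
    obtain ⟨op, v⟩ := x
    rw [jmpIdx_cons, jmpIdx_cons, ih (s + 1), ih (0 + 1), List.map_append, List.map_map]
    congr 1
    · by_cases hop : op = "jmp" <;> simp [hop]
    · congr 1; funext x; simp; ring

theorem length_jmpIdx_cons (op : String) (v : Int) (rest : List (String × Int)) :
    (jmpIdx ((op, v) :: rest) 0).length =
      (if op = "jmp" then 1 else 0) + (jmpIdx rest 0).length := by
  rw [jmpIdx_cons, jmpIdx_shift rest (0 + 1)]
  by_cases hop : op = "jmp"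
  · simp [hop]; omega
  · simp [hop]

theorem fRef_big (prog : List (String × Int)) (j : Int)
    (h : ((jmpIdx prog 0).length : Int) < j) : fRef prog j = prog := by
  induction prog generalizing j with
  | nil => rfl
  | cons x rest ih =>
    obtain ⟨op, v⟩ := x
    rw [length_jmpIdx_cons] at h
    simp only [fRef]
    by_cases hop : op = "jmp"
    · rw [if_pos hop] at h
      have h1 : (j == 1) = false := by simp; push_cast at h; omega
      simp [hop, h1, ih _ (by push_cast at h ⊢; omega : ((jmpIdx rest 0).length : Int) < j - 1)]
    · rw [if_neg hop] at h
      simp [hop, ih _ (by push_cast at h ⊢; omega : ((jmpIdx rest 0).length : Int) < j)]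

theorem jmpIdx_nonneg (prog : List (String × Int)) (i : Int) (hi : i ∈ jmpIdx prog 0) : 0 ≤ i := by
  simp only [jmpIdx, List.mem_filterMap] at hi
  obtain ⟨p, hp, hif⟩ := hi
  rw [PySem.List.mem_enumerate_iff] at hp
  obtain ⟨k, hk, hpk⟩ := hp
  split at hif
  · injection hif with h'
    rw [hpk] at h'
    simp at h'
    omega
  · exact absurd hif (by simp)

theorem alt_unfold (prog : List (String × Int)) (j : Int) :
    substitute_jmp_alt prog j =
      if 1 ≤ j ∧ j ≤ ((jmpIdx prog 0).length : Int) then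
        match PySem.List.pyGet? (jmpIdx prog 0) (j - 1) with
        | some idx =>
          match PySem.List.pyGet? prog idx with
          | some (_, v) => prog.set idx.toNat ("nop", v)
          | none => prog
        | none => prog
      else prog := rfl

-- the inner edit commutes with cons for a nonnegative shifted index
theorem edit_cons (op : String) (v : Int) (rest : List (String × Int)) (i : Int) (hi : 0 ≤ i) :
    (match PySem.List.pyGet? ((op, v) :: rest) (i + 1) with
      | some (_, w) => ((op, v) :: rest).set (i + 1).toNat ("nop", w)
      | none => (op, v) :: rest)
    = (op, v) :: (match PySem.List.pyGet? rest i with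
      | some (_, w) => rest.set i.toNat ("nop", w)
      | none => rest) := by
  rw [PySem.List.pyGet?_of_nonneg _ (by omega : (0:Int) ≤ i + 1),
    PySem.List.pyGet?_of_nonneg _ hi]
  have ht : (i + 1).toNat = i.toNat + 1 := by omega
  rw [ht]
  simp only [List.getElem?_cons_succ]
  cases h : rest[i.toNat]? with
  | none => simp
  | some p => obtain ⟨_, w⟩ := p; simp

theorem alt_eq_fRef (prog : List (String × Int)) (j : Int) :
    substitute_jmp_alt prog j = fRef prog j := by
  induction prog generalizing j with
  | nil =>
    rw [alt_unfold]
    have : ¬ (1 ≤ j ∧ j ≤ ((jmpIdx ([] : List (String × Int)) 0).length : Int)) := by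
      simp [jmpIdx, PySem.List.enumerate]; omega
    rw [if_neg this]; rfl
  | cons x rest ih =>
    obtain ⟨op, v⟩ := x
    have hlen := length_jmpIdx_cons op v rest
    have hnn := jmpIdx_nonneg rest
    by_cases hop : op = "jmp"
    · -- op = "jmp"
      rw [alt_unfold, jmpIdx_cons, if_pos hop]
      simp only [List.singleton_append]
      rw [jmpIdx_shift rest (0 + 1)]
      by_cases hg : 1 ≤ j ∧ j ≤ ((jmpIdx rest 0).length : Int) + 1
      · rw [if_pos (by simp only [List.length_cons, List.length_map]; push_cast; omega)]
        by_cases h1 : j = 1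
        · subst h1
          norm_num
          simp [fRef, hop, fRef_nonpos rest 0 le_rfl]
        · -- 2 ≤ j
          have h2 : 2 ≤ j := by omega
          rw [PySem.List.pyGet?_of_nonneg _ (by omega : (0:Int) ≤ j - 1)]
          have ht : (j - 1).toNat = (j - 2).toNat + 1 := by omega
          rw [ht, List.getElem?_cons_succ, List.getElem?_map]
          have hk : (j - 2).toNat < (jmpIdx rest 0).length := by omega
          rw [List.getElem?_eq_getElem hk]
          simp only [Option.map_some]
          set i := (jmpIdx rest 0)[(j - 2).toNat] with hidef
          have hi : 0 ≤ i := hnn i (by rw [hidef]; exact List.getElem_mem hk)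
          rw [show i + (0 + 1) = i + 1 by ring, edit_cons op v rest i hi]
          simp only [fRef, hop, beq_self_eq_true, if_true]
          have hj1 : (j == 1) = false := by simp; omega
          rw [hj1]
          congr 1
          rw [← ih (j - 1), alt_unfold]
          rw [if_pos (by constructor <;> omega)]
          rw [PySem.List.pyGet?_of_nonneg _ (by omega : (0:Int) ≤ j - 1 - 1)]
          have : (j - 1 - 1).toNat = (j - 2).toNat := by omega
          rw [this, List.getElem?_eq_getElem hk]
      · rw [if_neg (by simp only [List.length_cons, List.length_map]; push_cast; omega)]
        rcases not_and_or.mp hg with h | h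
        · exact (fRef_nonpos _ _ (by omega)).symm
        · exact (fRef_big _ _ (by rw [hlen, if_pos hop]; push_cast; omega)).symm
    · -- op ≠ "jmp"
      have hfr : fRef ((op, v) :: rest) j = (op, v) :: fRef rest j := by simp [fRef, hop]
      rw [alt_unfold, jmpIdx_cons, if_neg hop, List.nil_append, jmpIdx_shift rest (0 + 1), hfr]
      by_cases hg : 1 ≤ j ∧ j ≤ ((jmpIdx rest 0).length : Int)
      · rw [if_pos (by simp only [List.length_map]; exact hg)]
        rw [PySem.List.pyGet?_of_nonneg _ (by omega : (0:Int) ≤ j - 1), List.getElem?_map]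
        have hk : (j - 1).toNat < (jmpIdx rest 0).length := by omega
        rw [List.getElem?_eq_getElem hk]
        simp only [Option.map_some]
        set i := (jmpIdx rest 0)[(j - 1).toNat] with hidef
        have hi : 0 ≤ i := hnn i (by rw [hidef]; exact List.getElem_mem hk)
        rw [show i + (0 + 1) = i + 1 by ring, edit_cons op v rest i hi]
        congr 1
        rw [← ih j, alt_unfold, if_pos hg, PySem.List.pyGet?_of_nonneg _ (by omega : (0:Int) ≤ j - 1),
          List.getElem?_eq_getElem hk]
      · rw [if_neg (by simp only [List.length_map]; exact hg)]
        rcases not_and_or.mp hg with h | h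
        · rw [fRef_nonpos rest j (by omega)]
        · rw [fRef_big rest j (by omega)]

-- ===== VERDICT (by name: the statement is the Claim_ definition above) =====
theorem substitute_jmp_spec : Claim_equal_substitute_jmp := by
  intro program jmp_number _
  unfold Spec_substitute_jmp substitute_jmp
  rw [substituteJmpGo_eq_fRef, alt_eq_fRef]
  norm_num
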